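-- pv_equiv track=rewrite | github.com/faisvire/mathstat-hw | hw2-4/task4.1.6.mathstat.py | create_intervals_discrete
-- ===== SOURCE A (Python) =====
-- def create_intervals_discrete(k, theta_est):
--     base_len = theta_est // k
--     remainder = theta_est % k
--     intervals = []
--     start = 1
--     for i in range(k):
--         length = base_len + (1 if i < remainder else 0)
--         end = start + length - 1
--         intervals.append((start, end))
--         start = end + 1
--     return intervals
-- ===== SOURCE B (Python) =====
-- def create_intervals_discrete(k, theta_est):
--     base_len = theta_est // k
--     remainder = theta_est % k
--     return [(1 + i * base_len + min(i, remainder),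
--              i * base_len + min(i, remainder) + base_len + (1 if i < remainder else 0))
--             for i in range(k)]
-- ===== Notes on version B (the rewrite author's own statement) =====
-- stated objective: alternative
-- what changed: Replaces the loop-carried start/end accumulator with a per-index closed form (start = 1 + i*base_len + min(i, remainder)) computed independently for each i.
-- outside the precondition, e.g. on create_intervals_discrete(0, 5): A raises ZeroDivisionError, B raises ZeroDivisionError
import Mathlib
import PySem

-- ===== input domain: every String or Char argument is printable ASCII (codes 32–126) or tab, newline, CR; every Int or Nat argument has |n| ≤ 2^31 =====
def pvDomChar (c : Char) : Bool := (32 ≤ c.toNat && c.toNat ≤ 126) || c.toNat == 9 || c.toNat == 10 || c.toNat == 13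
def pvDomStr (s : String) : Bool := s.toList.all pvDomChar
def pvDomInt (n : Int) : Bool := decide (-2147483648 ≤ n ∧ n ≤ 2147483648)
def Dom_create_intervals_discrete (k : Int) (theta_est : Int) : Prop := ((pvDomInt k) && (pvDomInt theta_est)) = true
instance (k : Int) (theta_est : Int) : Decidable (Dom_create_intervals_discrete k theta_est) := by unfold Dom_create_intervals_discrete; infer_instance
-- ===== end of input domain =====

-- B replaces A's loop-carried start/end accumulator with a per-index closed form; same O(k) cost.


-- ===== PORT A =====
def create_intervals_discrete (k : Int) (theta_est : Int) : List (Int × Int) :=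
  let base_len := PySem.Int.floordiv theta_est k
  let remainder := PySem.Int.mod theta_est k
  let st := (PySem.List.pyRange 0 k 1).foldl
    (fun (st : List (Int × Int) × Int) (i : Int) =>
      let length := base_len + (if i < remainder then 1 else 0)
      let e := st.2 + length - 1
      (st.1 ++ [(st.2, e)], e + 1))
    ([], 1)
  st.1

-- ===== PORT B =====
def create_intervals_discrete_alt (k : Int) (theta_est : Int) : List (Int × Int) :=
  let base_len := PySem.Int.floordiv theta_est k
  let remainder := PySem.Int.mod theta_est k
  (PySem.List.pyRange 0 k 1).map (fun i =>
    (1 + i * base_len + min i remainder,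
     i * base_len + min i remainder + base_len + (if i < remainder then 1 else 0)))

-- ===== PRECONDITION & SPEC =====
-- Pre_ excludes exactly k = 0, on which Python's '//' and '%' raise ZeroDivisionError.
def Pre_create_intervals_discrete (k : Int) (theta_est : Int) : Prop := k ≠ 0
instance (k : Int) (theta_est : Int) : Decidable (Pre_create_intervals_discrete k theta_est) := by unfold Pre_create_intervals_discrete; infer_instance
def pvWitness_create_intervals_discrete : Int × Int := (3, 10)

def Spec_create_intervals_discrete (k : Int) (theta_est : Int) (out : List (Int × Int)) : Prop := out = create_intervals_discrete_alt k theta_est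
instance (k : Int) (theta_est : Int) (out : List (Int × Int)) : Decidable (Spec_create_intervals_discrete k theta_est out) := by unfold Spec_create_intervals_discrete; infer_instance

-- ===== CLAIM (what is proved, stated in full; the proofs are below) =====
def Claim_equal_create_intervals_discrete : Prop := ∀ (k : Int) (theta_est : Int), Dom_create_intervals_discrete k theta_est → Pre_create_intervals_discrete k theta_est → Spec_create_intervals_discrete k theta_est (create_intervals_discrete k theta_est)

-- ===== LEMMAS AND PROOFS =====

-- loop invariant: after processing indices 0..n-1, the accumulator is B's map over
-- those indices and the running start equals the closed form 1 + n*base + min n rem.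
lemma fold_closed (base rem : Int) (hrem : 0 ≤ rem) (n : Nat) :
    (List.map (fun (j : Nat) => (j : Int)) (List.range n)).foldl
      (fun (st : List (Int × Int) × Int) (i : Int) =>
        (st.1 ++ [(st.2, st.2 + (base + if i < rem then 1 else 0) - 1)],
         st.2 + (base + if i < rem then 1 else 0) - 1 + 1))
      ([], 1)
    = (List.map (fun (j : Nat) =>
        ((1 + (j : Int) * base + min (j : Int) rem,
          (j : Int) * base + min (j : Int) rem + base + (if (j : Int) < rem then 1 else 0))))
        (List.range n),
       1 + (n : Int) * base + min (n : Int) rem) := by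
  induction n with
  | zero => simp [min_eq_left hrem]
  | succ n ih =>
    rw [List.range_succ]
    simp only [List.map_append, List.map_cons, List.map_nil, List.foldl_append,
      List.foldl_cons, List.foldl_nil, ih]
    have hmin : min ((n : Int) + 1) rem = min (n : Int) rem + (if (n : Int) < rem then 1 else 0) := by
      split_ifs with h <;> omega
    simp only [Prod.mk.injEq]
    refine ⟨?_, ?_⟩
    · congr 1
      simp only [List.cons.injEq, Prod.mk.injEq, and_true]
      refine ⟨trivial, ?_⟩
      split_ifs <;> ring
    · push_cast
      rw [hmin]
      split_ifs <;> ring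

-- ===== VERDICT (by name: the statement is the Claim_ definition above) =====
theorem create_intervals_discrete_spec : Claim_equal_create_intervals_discrete := by
  intro k theta _ hk
  unfold Spec_create_intervals_discrete create_intervals_discrete create_intervals_discrete_alt
  by_cases hkpos : 0 < k
  · have hrem : 0 ≤ PySem.Int.mod theta k := PySem.Int.mod_nonneg theta hkpos
    rw [PySem.List.pyRange_one 0 k]
    simp only [zero_add, sub_zero]
    rw [fold_closed _ _ hrem]
    simp [List.map_map]
  · have : k < 0 := lt_of_le_of_ne (not_lt.mp hkpos) hk
    rw [PySem.List.pyRange_one_eq_nil (by omega)]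
    simp
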